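/-
  SEGMENT C11 OF `start_decoder` (THE LOOKUP HEADER OF A CODEBOOK: `minimum_value`, `delta_value`, `value_bits`, `sequence_p`,
  `lookup_values` (type 1: `lookup1_values` + FIX 17; type 2: `entries · dimensions`), `== 0` rejected, the temp block `mults`, loop 3892
  `for (j=0; j < (int) c->lookup_values; ++j)`; stb_vorbis_fixed.c:3878–3897, 0x114bad … 0x114db4, 126 instructions), SPLIT IN SEVEN at
  five call returns that have labels (`cut152`, `cut155`, `cut159`, `loop11` = `cut157`, `cut158`) and at one new join (`at_114c6f`).

      StartDecoder.In11P / At11R / At11B / At11T   the clauses of `InC11` at a program counter `pc` (`In11P`), and the three points that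
                                         use them: 0x114be4 (+ `r15 = f`), 0x114c26 (+ `1 ≤ value_bits ≤ 16`), 0x114d1a (+ `value_bits`,
                                         `lookup_type = 1`)
      StartDecoder.In11V / At11V         0x114c6f, the join before `if (c->lookup_values == 0)`: `lookup_values` is stored (`InC11.lv0` is
                                         false from here on), with FIX 17 / the type-2 product and `lookup_values < 2^30`
      StartDecoder.In11L / At11L         the invariant of loop 3892 at a program counter (`loop11`, `cut158`): the clauses of `InC12` but
                                         `rbx`, + `ebp = j ≤ LV` + `LV = n` (the loop bound as a ghost of the claims)
      StartDecoder.SegC11a               0x114bad → 0x114be4   (get_bits(32), float32_unpack, the store `minimum_value`, get_bits(32))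
      StartDecoder.SegC11b               0x114be4 → 0x114c26   (float32_unpack, the store `delta_value`, get_bits(4), the store
                                                                `value_bits`, get_bits(1))
      StartDecoder.SegC11c               0x114c26 → 0x114c6f (type 2: `lookup_values = entries · dimensions`) ∨ 0x114d1a (type 1: the
                                                                return of lookup1_values)
      StartDecoder.SegC11d               0x114d1a → 0x114c6f (FIX 17 passed, `lookup_values` stored) ∨ ERR (stub 0x114d41)
      StartDecoder.SegC11e               0x114c6f → 0x114ca3 with `j = 0` (setup_temp_malloc) ∨ ERR (stubs 0x114d58, 0x114d6f)
      StartDecoder.SegC11f               0x114ca3 → `AtC12` (`LV ≤ j`) ∨ 0x114cd0 with `j < LV`, `eax < 2^16` (get_bits(value_bits))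
      StartDecoder.SegC11g               0x114cd0 → 0x114ca3 with `j + 1` (the store `mults[j] = q`) ∨ ERR (the EOP stub 0x114d86:
                                                                setup_temp_free + error)
      StartDecoder.SegC11.of_parts       SegC11a → … → SegC11g → SegC11   (the claim `SegC11` of StartDecoderA.lean is unchanged)

  REGISTERS AT THE CUTS (callee-saved only): `r14 = c` (`Cur.r14`) everywhere; `r15 = f` from 0x114bb2 to 0x114c1e (dead from `cut155`
  on: 0x114c87, 0x114cc6 reload `f` from `q[R+18H]`, `Cur.slot_f`); `ebp = j` inside the loop (0x114c9f `mov ebp,[rsp+24H]` = 0 by Z24;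
  0x114cf6 `add ebp,1`); `rbx`, `r12`, `r13`, `rax`, `xmm0` are dead at every cut (`rax` at `cut152`: any 32 bits go into float32_unpack;
  at `cut155`: `sequence_p` = any byte; at `cut159`: lookup1_values' contract promises nothing, the two tests 0x114d1e / 0x114d2d
  decide; at `cut158`: `eax < 2^16`, compared with −1, the low 16 bits are stored). Stack slots: `q[R+18H] = f`, `d[R+24H] = 0`, `q[R+28H] = mults`
  (stored 0x114c91 BEFORE the NULL test).
  THE STORES INTO THE STRUCT: `[c+10H, c+14H)` minimum_value, `[c+14H, c+18H)` delta_value, `[c+18H]` value_bits, `[c+1AH]` sequence_p,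
  `[c+1CH, c+20H)` lookup_values. K1 – K5 read none of them (`C11.k15_quiet`); `BookFields.of_eqOn` asks for `[c, c+24)` and does not
  apply to the first two.
-/
import Vorbis.LabelsAt
import Vorbis.Spec.StartDecoderA
import Vorbis.Spec.StartDecoderCarry
namespace Vorbis.Spec.StartDecoder
open X86 X86.User Asan

/-- **The clauses of `InC11` at a program counter `pc`** (`cut152`, `cut155`, `cut159`): CUR(i) ∧ K1 – K5 ∧ LT ∈ {1,2} ∧ E·D ≤ P ∧
temps = [] ∧ c fresh at {LV, MU}. The stores of the stretch 0x114bad … 0x114c31 (`minimum_value`, `delta_value`, `value_bits`,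
`sequence_p`) change none of the fields these clauses read. -/
structure In11P (u₀ : State) (g : Ghost) (i : Nat) (A2 A3 Ai : Arena) (A : Arena × List Obj) (pc : Word) (v : State) : Prop where
  frame : Frame u₀ g pc A v
  cur : Cur g i A2 A3 Ai A v
  k : K15 (Since Ai A.1) v.mem (g.cb v.mem i)
  type_12 : Codebook.lookup_type v.mem (g.cb v.mem i) = 1 ∨ Codebook.lookup_type v.mem (g.cb v.mem i) = 2
  /-- FIX 3 -/
  prod_le : Codebook.entries v.mem (g.cb v.mem i) * Codebook.dimensions v.mem (g.cb v.mem i) ≤ 0x1FFFFFFF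
  noTemps : A.1.temps = []
  lv0 : Codebook.lookup_values v.mem (g.cb v.mem i) = 0
  mu0 : Codebook.multiplicands v.mem (g.cb v.mem i) = 0

/-- `InC11` is `In11P` at its own program counter. -/
theorem In11P.of_inC11 {u₀ : State} {g : Ghost} {i : Nat} {A2 A3 Ai : Arena} {A : Arena × List Obj} {v : State}
    (h : InC11 u₀ g i A2 A3 Ai A v) : In11P u₀ g i A2 A3 Ai A pc_C11 v :=
  ⟨h.frame, h.cur, h.k, h.type_12, h.prod_le, h.noTemps, h.lv0, h.mu0⟩

/-- **`At11R`, 0x114be4** (`cut152`: the return of the second `get_bits(f, 32)`; exit of `C11a`, entry of `C11b`): `In11P` +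
`r15 = f` (loaded at 0x114bb2 from `q[R+18H]`, callee-saved over get_bits / float32_unpack / the check call; read at 0x114c01,
0x114c1e). `eax` = the 32 bits of `delta_value`: nothing is asserted (float32_unpack takes any word). `minimum_value` is stored. -/
def At11R (u₀ : State) (g : Ghost) (i : Nat) (v : State) : Prop :=
  ∃ (A : Arena × List Obj) (A2 A3 Ai : Arena),
    In11P u₀ g i A2 A3 Ai A L.start_decoder.cut152 v ∧ v.reg .r15 = addr g.f

/-- **`At11B`, 0x114c26** (`cut155`: the return of `get_bits(f, 1)`; exit of `C11b`, entry of `C11c`): `In11P` +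
`1 ≤ value_bits ≤ 16` (the byte store 0x114c15 of `get_bits(f, 4) + 1`; read by `InC12.vb` and by the get_bits of the loop, `n ≤ 32`).
`eax` = `sequence_p`: any value. `r15` is dead from here on. -/
def At11B (u₀ : State) (g : Ghost) (i : Nat) (v : State) : Prop :=
  ∃ (A : Arena × List Obj) (A2 A3 Ai : Arena),
    In11P u₀ g i A2 A3 Ai A L.start_decoder.cut155 v ∧
    (1 ≤ Codebook.value_bits v.mem (g.cb v.mem i) ∧ Codebook.value_bits v.mem (g.cb v.mem i) ≤ 16)

/-- **`At11T`, 0x114d1a** (`cut159`: the return of `lookup1_values(c->entries, c->dimensions)`; exit of `C11c` for a type-1 book,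
entry of `C11d`): `In11P` + `1 ≤ value_bits ≤ 16` + `lookup_type = 1` (the `je` of 0x114c43 was taken). `eax`: NOTHING
(lookup1_values' contract promises nothing about the result; `js` 0x114d1e and `jl` 0x114d2d test it: FIX 17). -/
def At11T (u₀ : State) (g : Ghost) (i : Nat) (v : State) : Prop :=
  ∃ (A : Arena × List Obj) (A2 A3 Ai : Arena),
    In11P u₀ g i A2 A3 Ai A L.start_decoder.cut159 v ∧
    (1 ≤ Codebook.value_bits v.mem (g.cb v.mem i) ∧ Codebook.value_bits v.mem (g.cb v.mem i) ≤ 16) ∧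
    Codebook.lookup_type v.mem (g.cb v.mem i) = 1

/-- **THE JOIN 0x114c6f** (`at_114c6f`, `lea rdi,[r14+1CH]`, line 3889 `if (c->lookup_values == 0)`: the fall-through of the type-2
arm from the store 0x114c6b and the `jmp` 0x114d3c of the type-1 arm): the clauses of `InC11` but `lv0` (`lookup_values` IS stored
now), with `InC12`'s clauses about it: FIX 17 (type 1: `LV ≤ E`, the two tests of `C11d`), the product (type 2: the 32-bit `imul`
of 0x114c5e does not wrap, `prod_le`), `LV < 2^30`, and `1 ≤ value_bits ≤ 16`. NOT asserted: `1 ≤ LV` (tested next, 0x114c7e), any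
register but `r14`. -/
structure In11V (u₀ : State) (g : Ghost) (i : Nat) (A2 A3 Ai : Arena) (A : Arena × List Obj) (v : State) : Prop where
  frame : Frame u₀ g L.start_decoder.at_114c6f A v
  cur : Cur g i A2 A3 Ai A v
  k : K15 (Since Ai A.1) v.mem (g.cb v.mem i)
  type_12 : Codebook.lookup_type v.mem (g.cb v.mem i) = 1 ∨ Codebook.lookup_type v.mem (g.cb v.mem i) = 2
  /-- FIX 3 -/
  prod_le : Codebook.entries v.mem (g.cb v.mem i) * Codebook.dimensions v.mem (g.cb v.mem i) ≤ 0x1FFFFFFF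
  noTemps : A.1.temps = []
  mu0 : Codebook.multiplicands v.mem (g.cb v.mem i) = 0
  vb : 1 ≤ Codebook.value_bits v.mem (g.cb v.mem i) ∧ Codebook.value_bits v.mem (g.cb v.mem i) ≤ 16
  /-- FIX 17 -/
  type1_lv : Codebook.lookup_type v.mem (g.cb v.mem i) = 1 →
    (Codebook.lookup_values v.mem (g.cb v.mem i) : Int) ≤ Codebook.entries v.mem (g.cb v.mem i)
  type2_lv : Codebook.lookup_type v.mem (g.cb v.mem i) = 2 →
    (Codebook.lookup_values v.mem (g.cb v.mem i) : Int) =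
      Codebook.entries v.mem (g.cb v.mem i) * Codebook.dimensions v.mem (g.cb v.mem i)
  lv_lt : Codebook.lookup_values v.mem (g.cb v.mem i) < 2 ^ 30

/-- `At11V`: `In11V` for some ghost arena and ghost snapshots. Exit of `C11c` (type 2) and of `C11d` (type 1), entry of `C11e`. -/
def At11V (u₀ : State) (g : Ghost) (i : Nat) (v : State) : Prop :=
  ∃ (A : Arena × List Obj) (A2 A3 Ai : Arena), In11V u₀ g i A2 A3 Ai A v

/-- **THE INVARIANT OF LOOP 3892** at a program counter `pc` (`loop11` = 0x114ca3, the head; `cut158` = 0x114cd0, the return of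
`get_bits(f, c->value_bits)`): the clauses of `InC12` but `rbx` (dead at the head: 0x114cac reloads `ebx = LV`, which makes
`InC12.rbx` at the exit), + the counter `ebp = j` (the whole register: `mov ebp,[rsp+24H]`, `add ebp,1`) with `j ≤ LV`, + the bound
`LV = n`. The ghost arena is the one AFTER setup_temp_malloc (the snapshot `Am` of `AtC13`). No content of `mults` is asserted
(`InC12`: "u16, any"). -/
structure In11L (u₀ : State) (g : Ghost) (i : Nat) (A2 A3 Ai : Arena) (A : Arena × List Obj) (mults n j : Nat) (pc : Word)
    (v : State) : Prop where
  frame : Frame u₀ g pc A v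
  cur : Cur g i A2 A3 Ai A v
  k : K15 (Since Ai A.1) v.mem (g.cb v.mem i)
  type_12 : Codebook.lookup_type v.mem (g.cb v.mem i) = 1 ∨ Codebook.lookup_type v.mem (g.cb v.mem i) = 2
  prod_le : Codebook.entries v.mem (g.cb v.mem i) * Codebook.dimensions v.mem (g.cb v.mem i) ≤ 0x1FFFFFFF
  mults : Mults g A v.mem (g.cb v.mem i) mults
  /-- FIX 17 -/
  type1_lv : Codebook.lookup_type v.mem (g.cb v.mem i) = 1 →
    (Codebook.lookup_values v.mem (g.cb v.mem i) : Int) ≤ Codebook.entries v.mem (g.cb v.mem i)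
  type2_lv : Codebook.lookup_type v.mem (g.cb v.mem i) = 2 →
    (Codebook.lookup_values v.mem (g.cb v.mem i) : Int) =
      Codebook.entries v.mem (g.cb v.mem i) * Codebook.dimensions v.mem (g.cb v.mem i)
  vb : 1 ≤ Codebook.value_bits v.mem (g.cb v.mem i) ∧ Codebook.value_bits v.mem (g.cb v.mem i) ≤ 16
  mu0 : Codebook.multiplicands v.mem (g.cb v.mem i) = 0
  /-- the counter of loop 3892 -/
  rbp : v.reg .rbp = addr j
  j_le : j ≤ Codebook.lookup_values v.mem (g.cb v.mem i)
  /-- the loop bound, named: no instruction of the loop writes `c->lookup_values` -/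
  lv_eq : Codebook.lookup_values v.mem (g.cb v.mem i) = n

/-- `At11L n j pc`: `In11L` at `pc` for some ghost arena, `mults` block and ghost snapshots. -/
def At11L (u₀ : State) (g : Ghost) (i : Nat) (n j : Nat) (pc : Word) (v : State) : Prop :=
  ∃ (A : Arena × List Obj) (mults : Nat) (A2 A3 Ai : Arena), In11L u₀ g i A2 A3 Ai A mults n j pc v

/-- **The exit of the loop** (`jle 0x114db9` taken at 0x114cb2): `In11L` at `pc_C12` with `rbx = LV` (the zero-extending load
0x114cac) is `InC12`. -/
theorem In11L.toC12 {u₀ : State} {g : Ghost} {i : Nat} {A2 A3 Ai : Arena} {A : Arena × List Obj} {mults n j : Nat} {v : State}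
    (h : In11L u₀ g i A2 A3 Ai A mults n j pc_C12 v)
    (hrbx : v.reg .rbx = addr (Codebook.lookup_values v.mem (g.cb v.mem i))) : AtC12 u₀ g i v :=
  ⟨A, mults, A2, A3, Ai,
    { frame := h.frame
      cur := h.cur
      k := h.k
      type_12 := h.type_12
      prod_le := h.prod_le
      rbx := hrbx
      mults := h.mults
      type1_lv := h.type1_lv
      type2_lv := h.type2_lv
      vb := h.vb
      mu0 := h.mu0 }⟩

namespace C11

/-- **K1 – K5 OVER THE STORES OF C11**: K1 – K5 read `dimensions`, `entries`, `codeword_lengths` (`[c, c + 16)`), `sparse` (`[c + 27]`),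
`codewords`, `fast_huffman`, the sorted tables' fields (`[c + 40, c + 2120)`) and the `sorted_values` block — NOT `minimum_value`,
`delta_value`, `value_bits`, `lookup_type`, `sequence_p` (`[c + 16, c + 27)`), `lookup_values` (`[c + 28, c + 32)`), `multiplicands`.
(`BookFields.of_eqOn` asks for `[c, c + 24)` and `lookup_values`; `K15.of_kept` for `[c, c + 32)`: neither covers C11.) -/
theorem k15_quiet {Blk : Block → Prop} {mem mem' : Mem} {c : Nat} (h : K15 Blk mem c)
    (hlo : (Block.mk c 16).Kept mem mem') (hsp : (Block.mk (c + 27) 1).Kept mem mem')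
    (hhi : (Block.mk (c + 40) 2080).Kept mem mem')
    (hv : 1 ≤ Codebook.sorted_entries mem c → (Codebook.svBlock mem c).Kept mem mem') : K15 Blk mem' c := by
  have e_dim : Codebook.dimensions mem' c = Codebook.dimensions mem c := by
    simp only [vacc, voff]
    exact hlo.i32 _ (by simp only []; omega) (by simp only []; omega)
  have e_ent : Codebook.entries mem' c = Codebook.entries mem c := by
    simp only [vacc, voff]
    exact hlo.i32 _ (by simp only []; omega) (by simp only []; omega)
  have e_cl : Codebook.codeword_lengths mem' c = Codebook.codeword_lengths mem c := by
    simp only [vacc, voff]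
    exact hlo.u64 _ (by simp only []; omega) (by simp only []; omega)
  have e_sp : Codebook.sparse mem' c = Codebook.sparse mem c := by
    simp only [vacc, voff]
    exact hsp.u8 _ (by simp only []; omega) (by simp only []; omega)
  have e_cw : Codebook.codewords mem' c = Codebook.codewords mem c := by
    simp only [vacc, voff]
    exact hhi.u64 _ (by simp only []; omega) (by simp only []; omega)
  have e_fh : ∀ k, k < 1024 → Codebook.fast_huffman mem' c k = Codebook.fast_huffman mem c k := by
    intro k hk
    simp only [vacc, voff]
    exact hhi.i16 _ (by simp only []; omega) (by simp only []; omega)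
  have e_sc : Codebook.sorted_codewords mem' c = Codebook.sorted_codewords mem c := by
    simp only [vacc, voff]
    exact hhi.u64 _ (by simp only []; omega) (by simp only []; omega)
  have e_sv : Codebook.sorted_values mem' c = Codebook.sorted_values mem c := by
    simp only [vacc, voff]
    exact hhi.u64 _ (by simp only []; omega) (by simp only []; omega)
  have e_se : Codebook.sorted_entries mem' c = Codebook.sorted_entries mem c := by
    simp only [vacc, voff]
    exact hhi.i32 _ (by simp only []; omega) (by simp only []; omega)
  have e_N : Codebook.N mem' c = Codebook.N mem c := by
    unfold Codebook.N
    rw [e_sp, e_ent, e_se]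
  -- K1 – K4c through the field equations (the value of `multiplicands` is not used by them)
  have k1 : Codebook.K1 mem' c := by
    refine ⟨?_, ?_, ?_, ?_⟩
    · rw [e_dim]
      exact h.k1.dim_pos
    · rw [e_dim]
      exact h.k1.dim_le
    · rw [e_ent]
      exact h.k1.ent_nonneg
    · rw [e_ent]
      exact h.k1.ent_lt
  have k2 : Codebook.K2 mem' c := by
    refine ⟨?_, ?_, ?_, ?_, ?_⟩
    · rw [e_sp]
      exact h.k2.sparse_01
    · rw [e_se]
      exact h.k2.se_nonneg
    · rw [e_se, e_ent]
      exact h.k2.se_le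
    · rw [e_sp, e_se]
      exact h.k2.sparse_pos
    · rw [e_sp, e_se, e_ent]
      exact h.k2.sparse_quarter
  have k3 : Codebook.K3 Blk mem' c := by
    refine ⟨?_, ?_⟩
    · intro hs
      rw [e_sp] at hs
      have k := h.k3.dense hs
      refine ⟨?_, ?_⟩
      · rw [e_cl, e_ent]
        exact k.lengths
      · rw [e_cw, e_ent]
        exact k.codewords
    · intro hs
      rw [e_sp] at hs
      have k := h.k3.sparse hs
      refine ⟨?_, ?_⟩
      · rw [e_cl, e_se]
        exact k.lengths
      · rw [e_cw]
        exact k.codewords_null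
  have k4 : Codebook.K4 Blk mem' c := by
    refine ⟨?_, ?_, ?_, ?_⟩
    · rw [e_se, e_sc]
      exact h.k4.sc
    · rw [e_se, e_sv]
      exact h.k4.sv
    · rw [e_se, e_sv]
      intro hse
      rw [(hv hse).i32 _ (Nat.le_refl _) (by simp only []; omega)]
      exact h.k4.sentinel hse
    · rw [e_se, e_sc, e_sv]
      exact h.k4.null
  have k4c : Codebook.K4c mem' c := by
    intro x hx
    rw [e_se] at hx
    have hse : 1 ≤ Codebook.sorted_entries mem c := by omega
    have e_at : Codebook.sorted_values_at mem' c x = Codebook.sorted_values_at mem c x := by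
      simp only [Codebook.sorted_values_at, e_sv]
    have e_w : mem'.i32 (Codebook.sorted_values_at mem c x) = mem.i32 (Codebook.sorted_values_at mem c x) := by
      simp only [Codebook.sorted_values_at]
      apply (hv hse).i32
      · simp only []
        omega
      · simp only []
        omega
    rw [e_at, e_w, e_ent]
    exact h.k4c x hx
  refine ⟨k1, k2, k3, k4, k4c, ?_⟩
  intro k hk
  rw [e_fh k hk, e_N]
  exact h.k5 k hk

/-- **A window a stretch of C11 may write without touching anything its assertions read but the fields it stores**: the stack below
the steady `R` (a pushed return address, a callee's frame), the slot `q[R+28H]` of `mults`, the fields `[c + 16, c + 27)`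
(`minimum_value`, `delta_value`, `value_bits`, `lookup_type`, `sequence_p`) and `[c + 28, c + 32)` (`lookup_values`) of the struct, the
reader's five windows of `*f` (`error`'s `[f + 140, f + 144)` is inside the third). (The store into the `mults` temp block of `C11g`
is not such a window: `Cur.store_young`.) -/
def QuietWin11 (g : Ghost) (c : Nat) (w : Span) : Prop :=
  (g.R - 408 ≤ w.lo ∧ w.hi ≤ g.R) ∨
  (g.R + 0x28 ≤ w.lo ∧ w.hi ≤ g.R + 0x30) ∨
  (c + 16 ≤ w.lo ∧ w.hi ≤ c + 27) ∨
  (c + 28 ≤ w.lo ∧ w.hi ≤ c + 32) ∨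
  (g.f + 48 ≤ w.lo ∧ w.hi ≤ g.f + 56) ∨
  (g.f + 84 ≤ w.lo ∧ w.hi ≤ g.f + 96) ∨
  (g.f + 136 ≤ w.lo ∧ w.hi ≤ g.f + 144) ∨
  (g.f + 1484 ≤ w.lo ∧ w.hi ≤ g.f + 1749) ∨
  (g.f + 1752 ≤ w.lo ∧ w.hi ≤ g.f + 1784)

set_option maxHeartbeats 1000000 in
/-- **THE CARRY OF C11** (what every child but the store of `C11g` needs between two points with the SAME ghost arena): over a
stretch that writes only quiet windows (`QuietWin11`), `Frame` and `Cur` at the new state and program counter, `cb(i)` unmoved,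
K1 – K5, and the fields `dimensions`, `entries`, `multiplicands` (`prod_le`, `mu0`). The fields of `[c + 16, c + 32)` (`lookup_type`,
`value_bits`, `lookup_values`) are kept by a stretch that does not store them: `hs.eqOn _ _ (…)` + `.u8` / `.u32` per stretch.
`hb`: the reader's post (`w_post.bits.bits`) after a get_bits, else `bits_kept`. -/
theorem core11 {u₀ : State} {g : Ghost} {i : Nat} {A2 A3 Ai : Arena} {A : Arena × List Obj} {pc pc' : Word} {v w : State}
    {ws : List Span} (hfr : Frame u₀ g pc A v) (hcur : Cur g i A2 A3 Ai A v)
    (hk : K15 (Since Ai A.1) v.mem (g.cb v.mem i))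
    (hs : Mem.SameExcept ws v.mem w.mem) (hun : ShadowUntouched v.mem w.mem)
    (hq : ∀ x, x ∈ ws → QuietWin11 g (g.cb v.mem i) x) (hb : Bits (g.Blk A) g.len w.mem g.f)
    (hrip : w.rip = pc') (hrsp : w.reg .rsp = v.reg .rsp) (hcode : CodeOK u₀ w.mem) (hinv : abiInv w)
    (hr14 : w.reg .r14 = v.reg .r14) :
    Frame u₀ g pc' A w ∧ Cur g i A2 A3 Ai A w ∧ g.cb w.mem i = g.cb v.mem i ∧
      K15 (Since Ai A.1) w.mem (g.cb v.mem i) ∧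
      Codebook.dimensions w.mem (g.cb v.mem i) = Codebook.dimensions v.mem (g.cb v.mem i) ∧
      Codebook.entries w.mem (g.cb v.mem i) = Codebook.entries v.mem (g.cb v.mem i) ∧
      Codebook.multiplicands w.mem (g.cb v.mem i) = Codebook.multiplicands v.mem (g.cb v.mem i) := by
  have hpos : Pos g A := Pos.of hfr hcur
  have hm0 : MInv g i A2 A3 Ai A v.mem := MInv.of hfr hcur
  have hcw := hm0.c_where
  have hq0 : ∀ x, x ∈ ws → OkWin0 g (g.cb v.mem i) x := by
    intro x hx
    have k := hq x hx
    unfold QuietWin11 at k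
    unfold OkWin0
    omega
  have hF := Frame.step hfr hcur hs hun (fun x hx => (hq0 x hx).ok) hb hrip hrsp hcode hinv
  obtain ⟨hC, hcb⟩ := Cur.step hfr hcur hs hun (fun x hx => (hq0 x hx).ok) hb hr14
  -- the three kept parts of the struct `cb(i)`
  obtain ⟨p1, p2, p3, p4, p5, p6, p7, p8, p9, p10, p11, p12, p13, p14⟩ := hpos
  have hlo : (Block.mk (g.cb v.mem i) 16).Kept v.mem w.mem := by
    apply Block.Kept.of_sameExcept hs _ (by simp only []; omega)
    intro x hx
    have k := hq x hx
    unfold QuietWin11 at k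
    simp only []
    omega
  have hsp : (Block.mk (g.cb v.mem i + 27) 1).Kept v.mem w.mem := by
    apply Block.Kept.of_sameExcept hs _ (by simp only []; omega)
    intro x hx
    have k := hq x hx
    unfold QuietWin11 at k
    simp only []
    omega
  have hmid : (Block.mk (g.cb v.mem i + 32) 8).Kept v.mem w.mem := by
    apply Block.Kept.of_sameExcept hs _ (by simp only []; omega)
    intro x hx
    have k := hq x hx
    unfold QuietWin11 at k
    simp only []
    omega
  have hhi : (Block.mk (g.cb v.mem i + 40) 2080).Kept v.mem w.mem := by
    apply Block.Kept.of_sameExcept hs _ (by simp only []; omega)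
    intro x hx
    have k := hq x hx
    unfold QuietWin11 at k
    simp only []
    omega
  have hsv : 1 ≤ Codebook.sorted_entries v.mem (g.cb v.mem i) →
      (Codebook.svBlock v.mem (g.cb v.mem i)).Kept v.mem w.mem := by
    intro hse
    exact young_kept0 hm0 ⟨p1, p2, p3, p4, p5, p6, p7, p8, p9, p10, p11, p12, p13, p14⟩ hs hq0 (hk.k4.sv hse)
  have hk' : K15 (Since Ai A.1) w.mem (g.cb v.mem i) := k15_quiet hk hlo hsp hhi hsv
  have e_dim : Codebook.dimensions w.mem (g.cb v.mem i) = Codebook.dimensions v.mem (g.cb v.mem i) := by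
    simp only [vacc, voff]
    exact hlo.i32 _ (by simp only []; omega) (by simp only []; omega)
  have e_ent : Codebook.entries w.mem (g.cb v.mem i) = Codebook.entries v.mem (g.cb v.mem i) := by
    simp only [vacc, voff]
    exact hlo.i32 _ (by simp only []; omega) (by simp only []; omega)
  have e_mu : Codebook.multiplicands w.mem (g.cb v.mem i) = Codebook.multiplicands v.mem (g.cb v.mem i) := by
    simp only [vacc, voff]
    exact hmid.u64 _ (by simp only []; omega) (by simp only []; omega)
  exact ⟨hF, hC, hcb, hk', e_dim, e_ent, e_mu⟩

/-- **A window a stretch of loop 3892 may write besides the store into `mults`**: the stack below the steady `R` (a pushed return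
address, a check routine's or get_bits' frame) and the reader's five windows of `*f`. Nothing of the struct `cb(i)`, nothing of the
own frame's locals. -/
def QuietWinL (g : Ghost) (w : Span) : Prop :=
  (g.R - 408 ≤ w.lo ∧ w.hi ≤ g.R) ∨
  (g.f + 48 ≤ w.lo ∧ w.hi ≤ g.f + 56) ∨
  (g.f + 84 ≤ w.lo ∧ w.hi ≤ g.f + 96) ∨
  (g.f + 136 ≤ w.lo ∧ w.hi ≤ g.f + 144) ∨
  (g.f + 1484 ≤ w.lo ∧ w.hi ≤ g.f + 1749) ∨
  (g.f + 1752 ≤ w.lo ∧ w.hi ≤ g.f + 1784)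

set_option maxHeartbeats 1000000 in
/-- **THE CARRY OF THE INVARIANT OF LOOP 3892** over a stretch that writes only `QuietWinL` windows (check calls, get_bits): `In11L`
at the new state and program counter, same ghost arena and `mults`, for the NEW counter `j'` the register `rbp` holds there (bound
stated for the OLD state's `lookup_values`: the struct is kept). WHEN: both exits of `C11f` (to `pc_C12`: then `In11L.toC12`; to
`cut158`), and the walk of `C11g` before its store. `hb`: the reader's post after get_bits, else `bits_kept`. -/
theorem carryL {u₀ : State} {g : Ghost} {i : Nat} {A2 A3 Ai : Arena} {A : Arena × List Obj} {mults n j j' : Nat} {pc pc' : Word}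
    {v w : State} {ws : List Span} (h : In11L u₀ g i A2 A3 Ai A mults n j pc v)
    (hs : Mem.SameExcept ws v.mem w.mem) (hun : ShadowUntouched v.mem w.mem) (hq : ∀ x, x ∈ ws → QuietWinL g x)
    (hb : Bits (g.Blk A) g.len w.mem g.f)
    (hrip : w.rip = pc') (hrsp : w.reg .rsp = v.reg .rsp) (hcode : CodeOK u₀ w.mem) (hinv : abiInv w)
    (hr14 : w.reg .r14 = v.reg .r14) (hrbp : w.reg .rbp = addr j')
    (hj : j' ≤ Codebook.lookup_values v.mem (g.cb v.mem i)) :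
    In11L u₀ g i A2 A3 Ai A mults n j' pc' w := by
  have hq11 : ∀ x, x ∈ ws → QuietWin11 g (g.cb v.mem i) x := by
    intro x hx
    have k := hq x hx
    unfold QuietWinL at k
    unfold QuietWin11
    omega
  obtain ⟨hF, hC, hcb, hk15, _, _, _⟩ := core11 h.frame h.cur h.k hs hun hq11 hb hrip hrsp hcode hinv hr14
  have hpos : Pos g A := Pos.of h.frame h.cur
  have hm0 : MInv g i A2 A3 Ai A v.mem := MInv.of h.frame h.cur
  have hcw := hm0.c_where
  have p1 := hpos.r_eq
  have p2 := hpos.ra_lo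
  have p3 := hpos.ra_hi
  have p4 := hpos.f_stack
  have hq1 : ∀ x, x ∈ ws → OkWin0 g (g.cb v.mem i + 2120) x := by
    intro x hx
    have k := hq x hx
    unfold QuietWinL at k
    unfold OkWin0
    omega
  have hstruct : (Codebook.block (g.cb v.mem i)).Kept v.mem w.mem := by
    apply blk_kept0 (c := g.cb v.mem i + 2120) hpos hs hq1
    · simp only [vblock, voff]
      omega
    · simp only [vblock, voff]
      omega
  have hsf := Codebook.SameFields.of_kept hstruct
  have hst : Mem.EqOn (g.R + 0x28) (g.R + 0x30) v.mem w.mem := by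
    apply hs.eqOn
    intro x hx
    have k := hq x hx
    unfold QuietWinL at k
    omega
  have e28 : w.mem.u64 (g.R + 0x28) = v.mem.u64 (g.R + 0x28) :=
    hst.u64 (g.R + 0x28) (Nat.le_refl _) (by omega) (by omega)
  exact
    { frame := hF
      cur := hC
      k := by rw [hcb]; exact hk15
      type_12 := by rw [hcb, hsf.lookup_type]; exact h.type_12
      prod_le := by rw [hcb, hsf.entries, hsf.dimensions]; exact h.prod_le
      mults :=
        { slot := by rw [e28]; exact h.mults.slot
          temps := by rw [hcb, hsf.lookup_values]; exact h.mults.temps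
          lv_pos := by rw [hcb, hsf.lookup_values]; exact h.mults.lv_pos
          lv_lt := by rw [hcb, hsf.lookup_values]; exact h.mults.lv_lt }
      type1_lv := by rw [hcb, hsf.lookup_type, hsf.lookup_values, hsf.entries]; exact h.type1_lv
      type2_lv := by rw [hcb, hsf.lookup_type, hsf.lookup_values, hsf.entries, hsf.dimensions]; exact h.type2_lv
      vb := by rw [hcb, hsf.value_bits]; exact h.vb
      mu0 := by rw [hcb, hsf.multiplicands]; exact h.mu0
      rbp := hrbp
      j_le := by rw [hcb, hsf.lookup_values]; exact hj
      lv_eq := by rw [hcb, hsf.lookup_values]; exact h.lv_eq }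

end C11

/-- **Segment `start_decoder.C11a`** (0x114bad … 0x114bdf, 13 instructions: `r15 = f` from `q[R+18H]`, `get_bits(f, 32)`,
float32_unpack, the checked store `c->minimum_value` (`[c+10H, c+14H)`), the second `get_bits(f, 32)`): from the entry of C11 to
the return of the second get_bits. -/
def SegC11a (Lay : Layout) (μ : Microarch) (u₀ : State) : Prop :=
  ∀ (g : Ghost) (i : Nat) (v : State), AtC11 u₀ g i v → ReachVia Lay μ WayInv v (fun w => At11R u₀ g i w)

/-- **Segment `start_decoder.C11b`** (0x114be4 … 0x114c21, 16 instructions: float32_unpack, the checked store `c->delta_value`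
(`[c+14H, c+18H)`), `get_bits(f, 4)`, the checked byte store `c->value_bits = x + 1` (`[c+18H]`; `x < 16`), `get_bits(f, 1)`): to the
return of the fourth get_bits. -/
def SegC11b (Lay : Layout) (μ : Microarch) (u₀ : State) : Prop :=
  ∀ (g : Ghost) (i : Nat) (v : State), At11R u₀ g i v → ReachVia Lay μ WayInv v (fun w => At11B u₀ g i w)

/-- **Segment `start_decoder.C11c`** (0x114c26 … 0x114c6b with the type-1 arm 0x114cfb … 0x114d15; 25 instructions: the checked byte
store `c->sequence_p` (`[c+1AH]`), the test `lookup_type == 1` (check 0x114c39); type 2: `lookup_values = entries · dimensions`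
(checks 0x114c4d, 0x114c59, the 32-bit `imul`, the checked store 0x114c6b) → the join; type 1: the loads of `dimensions`, `entries`
(checks 0x114cfe, 0x114d0a) and `call lookup1_values`): to the join 0x114c6f or to the return of lookup1_values. -/
def SegC11c (Lay : Layout) (μ : Microarch) (u₀ : State) : Prop :=
  ∀ (g : Ghost) (i : Nat) (v : State), At11B u₀ g i v →
    ReachVia Lay μ WayInv v (fun w => At11V u₀ g i w ∨ At11T u₀ g i w)

/-- **Segment `start_decoder.C11d`** (0x114d1a … 0x114d3c with the stub 0x114d41 … 0x114d53; 16 instructions: FIX 17 `values < 0` or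
`entries < values` (signed; check 0x114d24) → `error(f, 20)`, `jmp 0x113b22`; otherwise the checked store `c->lookup_values = values`
and the `jmp` to the join): from the return of lookup1_values to the join or to the error exit. -/
def SegC11d (Lay : Layout) (μ : Microarch) (u₀ : State) : Prop :=
  ∀ (g : Ghost) (i : Nat) (v : State), At11T u₀ g i v →
    ReachVia Lay μ WayInv v (fun w => At11V u₀ g i w ∨ AtERR u₀ g w)

/-- **Segment `start_decoder.C11e`** (0x114c6f … 0x114c9f with the stubs 0x114d58 … 0x114d6a and 0x114d6f … 0x114d81; 22 instructions:
`lookup_values == 0` (check 0x114c73) → `error(f, 20)`; `setup_temp_malloc(f, 2·LV)`, the spill of the result to `q[R+28H]`,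
NULL → `error(f, 3)`; `j = 0` from `d[R+24H]`): from the join to the head of loop 3892 with `j = 0` (the ghost arena grows by the temp
block), or to the error exit. -/
def SegC11e (Lay : Layout) (μ : Microarch) (u₀ : State) : Prop :=
  ∀ (g : Ghost) (i : Nat) (v : State), At11V u₀ g i v →
    ReachVia Lay μ WayInv v (fun w => (∃ n, At11L u₀ g i n 0 L.start_decoder.loop11 w) ∨ AtERR u₀ g w)

/-- **Segment `start_decoder.C11f`** (0x114ca3 … 0x114ccb, 10 instructions: `ebx = c->lookup_values` (check 0x114ca7), `LV ≤ j`
(signed, both below 2^30) → 0x114db9 = `AtC12`; otherwise `get_bits(f, c->value_bits)` (check 0x114cbc; `value_bits ≤ 16`)): from the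
head of the loop to `AtC12` or to the return of get_bits with `j < LV` and `q = eax < 2^16` (get_bits' result contract
`GetBitsResult` for `n = value_bits ≤ 16`: the farm worker of C11 found that this makes the `q == EOP` arm of `C11g` DEAD). -/
def SegC11f (Lay : Layout) (μ : Microarch) (u₀ : State) : Prop :=
  ∀ (g : Ghost) (i : Nat) (n j : Nat) (v : State), At11L u₀ g i n j L.start_decoder.loop11 v →
    ReachVia Lay μ WayInv v (fun w => AtC12 u₀ g i w ∨
      (At11L u₀ g i n j L.start_decoder.cut158 w ∧ j < n ∧ (w.reg .rax).toNat < 2 ^ 16))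

/-- **Segment `start_decoder.C11g`** (0x114cd0 … 0x114cf9 with the EOP stub 0x114d86 … 0x114db4; 24 instructions: `q == EOP` →
`setup_temp_free(f, mults, 2·LV)` (check 0x114d8f), `error(f, 20)`, `jmp 0x113b22`; otherwise the checked 2-byte store
`mults[j] = q` (`mults + 2j` inside the temp block since `j < LV`), `++j`): from the return of get_bits to the head of the loop with
`j + 1`, or to the error exit. With `eax < 2^16` the `je 0x114d86` of 0x114cd6 is never taken (`eax ≠ FFFFFFFFH`): the stub's
goals close by contradiction; the exit `AtERR` stays in the claim for a worker who prefers to walk it. -/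
def SegC11g (Lay : Layout) (μ : Microarch) (u₀ : State) : Prop :=
  ∀ (g : Ghost) (i : Nat) (n j : Nat) (v : State), At11L u₀ g i n j L.start_decoder.cut158 v → j < n →
    (v.reg .rax).toNat < 2 ^ 16 →
    ReachVia Lay μ WayInv v (fun w => At11L u₀ g i n (j + 1) L.start_decoder.loop11 w ∨ AtERR u₀ g w)

/-- **Segment C11 from its seven parts**: the straight part by `ReachVia.trans`; loop 3892 by induction on `n − j` (C11f's exit to
the body states `j < n`). -/
theorem SegC11.of_parts {Lay : Layout} {μ : Microarch} {u₀ : State} (ha : SegC11a Lay μ u₀) (hb : SegC11b Lay μ u₀)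
    (hc : SegC11c Lay μ u₀) (hd : SegC11d Lay μ u₀) (he : SegC11e Lay μ u₀) (hf : SegC11f Lay μ u₀) (hg : SegC11g Lay μ u₀) :
    SegC11 Lay μ u₀ := by
  intro g i v hat
  -- loop 3892: from its head with any `j` to `AtC12` or the error exit
  have hloop : ∀ (n m j : Nat) (s : State), At11L u₀ g i n j L.start_decoder.loop11 s → n - j ≤ m →
      ReachVia Lay μ WayInv s (fun w => AtC12 u₀ g i w ∨ AtERR u₀ g w) := by
    intro n m
    induction m with
    | zero =>
      intro j s hs hm
      refine (hf g i n j s hs).trans ?_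
      intro w hw
      rcases hw with h12 | h58
      · exact ReachVia.done (Or.inl h12)
      · have hlt := h58.2.1
        omega
    | succ m ih =>
      intro j s hs hm
      refine (hf g i n j s hs).trans ?_
      intro w hw
      rcases hw with h12 | h58
      · exact ReachVia.done (Or.inl h12)
      · refine (hg g i n j w h58.1 h58.2.1 h58.2.2).trans ?_
        intro w2 h2
        rcases h2 with hj | herr
        · exact ih (j + 1) w2 hj (by omega)
        · exact ReachVia.done (Or.inr herr)
  -- from the join 0x114c6f on
  have hjoin : ∀ (s : State), At11V u₀ g i s → ReachVia Lay μ WayInv s (fun w => AtC12 u₀ g i w ∨ AtERR u₀ g w) := by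
    intro s hs
    refine (he g i s hs).trans ?_
    intro w hw
    rcases hw with hl | herr
    · obtain ⟨n, hn⟩ := hl
      exact hloop n _ 0 w hn (Nat.le_refl _)
    · exact ReachVia.done (Or.inr herr)
  refine (ha g i v hat).trans ?_
  intro w1 h1
  refine (hb g i w1 h1).trans ?_
  intro w2 h2
  refine (hc g i w2 h2).trans ?_
  intro w3 h3
  rcases h3 with hv | ht
  · exact hjoin w3 hv
  · refine (hd g i w3 ht).trans ?_
    intro w4 h4
    rcases h4 with hv | herr
    · exact hjoin w4 hv
    · exact ReachVia.done (Or.inr herr)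

end Vorbis.Spec.StartDecoder
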